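-- pv_equiv track=rewrite | github.com/commit0-fillin/click | src/click/utils.py | make_default_short_help
-- ===== SOURCE A (Python) =====
-- def make_default_short_help(help: str, max_length: int=45) -> str:
--     """Returns a condensed version of help string."""
--     words = help.split()
--     total_length = 0
--     result = []
--     for word in words:
--         if total_length + len(word) + 1 > max_length:
--             break
--         result.append(word)
--         total_length += len(word) + 1
--     return ' '.join(result)
-- ===== SOURCE B (Python) =====
-- def make_default_short_help(help: str, max_length: int = 45) -> str:
--     """Condensed help: build a prefix-cost table, count affordable prefixes, slice."""
--     words = help.split()
--     prefix = []
--     running = 0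
--     for w in words:
--         running += len(w) + 1
--         prefix.append(running)
--     cutoff = sum(1 for p in prefix if p <= max_length)
--     return ' '.join(words[:cutoff])
-- ===== Notes on version B (the rewrite author's own statement) =====
-- stated objective: alternative
-- what changed: Replaces the greedy accumulate-and-break loop with a prefix-sum cost table followed by a count of affordable prefixes and a single slice+join; correct because the strictly increasing costs make the affordable prefixes exactly a leading run.
import Mathlib
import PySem

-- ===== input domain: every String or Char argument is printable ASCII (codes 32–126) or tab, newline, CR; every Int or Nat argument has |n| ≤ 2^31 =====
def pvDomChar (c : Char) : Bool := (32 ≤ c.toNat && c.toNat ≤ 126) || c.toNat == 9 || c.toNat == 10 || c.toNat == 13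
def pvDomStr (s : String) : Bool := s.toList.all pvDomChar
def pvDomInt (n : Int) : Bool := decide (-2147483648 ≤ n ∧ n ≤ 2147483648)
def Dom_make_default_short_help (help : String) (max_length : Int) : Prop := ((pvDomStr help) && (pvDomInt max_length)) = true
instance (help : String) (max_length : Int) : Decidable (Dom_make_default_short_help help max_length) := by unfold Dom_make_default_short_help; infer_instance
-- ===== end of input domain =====

-- B replaces A's accumulate-and-break loop by a prefix-cost table, a count of affordable
-- prefixes and one slice (alternative decomposition, same cost).

-- ===== PORT A =====
-- A's for-loop with break: walk the words carrying running total and result list.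
def pvALoop (max_length : Int) : List String → Int → List String → List String
  | [], _, result => result
  | w :: ws, total, result =>
    if max_length < total + PySem.Str.len w + 1 then result
    else pvALoop max_length ws (total + PySem.Str.len w + 1) (result ++ [w])

def make_default_short_help (help : String) (max_length : Int) : String :=
  let words := PySem.Str.split₀ help
  PySem.Str.join " " (pvALoop max_length words 0 [])

-- ===== PORT B =====
-- Source B's first loop: running prefix sums of len(w)+1.
def pvPrefix : List String → Int → List Int
  | [], _ => []
  | w :: ws, running =>
    let r := running + PySem.Str.len w + 1
    r :: pvPrefix ws r

def make_default_short_help_alt (help : String) (max_length : Int) : String :=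
  let words := PySem.Str.split₀ help
  let prefixT := pvPrefix words 0
  let cutoff : Int := prefixT.foldl (fun c p => if p ≤ max_length then c + 1 else c) 0
  PySem.Str.join " " (PySem.List.slice words none (some cutoff))

-- ===== PRECONDITION & SPEC =====
def Spec_make_default_short_help (help : String) (max_length : Int) (out : String) : Prop := out = make_default_short_help_alt help max_length
instance (help : String) (max_length : Int) (out : String) : Decidable (Spec_make_default_short_help help max_length out) := by unfold Spec_make_default_short_help; infer_instance

-- ===== CLAIM =====
def Claim_equal_make_default_short_help : Prop := ∀ (help : String) (max_length : Int), Dom_make_default_short_help help max_length → Spec_make_default_short_help help max_length (make_default_short_help help max_length)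

-- ===== LEMMAS AND PROOFS =====
theorem pv_len_nonneg (w : String) : 0 ≤ PySem.Str.len w := by
  simp [PySem.Str.len_eq]

theorem pv_countP_zero (M : Int) (ws : List String) (t : Int) (h : M ≤ t) :
    (pvPrefix ws t).countP (fun p => decide (p ≤ M)) = 0 := by
  induction ws generalizing t with
  | nil => simp [pvPrefix]
  | cons w ws ih =>
    have hw := pv_len_nonneg w
    simp only [pvPrefix, List.countP_cons]
    rw [ih (t + PySem.Str.len w + 1) (by omega)]
    simp
    omega

theorem pv_foldl_count (M : Int) (l : List Int) (c : Int) :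
    l.foldl (fun c p => if p ≤ M then c + 1 else c) c
      = c + ((l.countP (fun p => decide (p ≤ M)) : Nat) : Int) := by
  induction l generalizing c with
  | nil => simp
  | cons p l ih =>
    simp only [List.foldl_cons, List.countP_cons, ih]
    by_cases h : p ≤ M
    · simp [h]; omega
    · simp [h]

theorem pv_aloop_eq_take (M : Int) (ws : List String) (t : Int) (res : List String) :
    pvALoop M ws t res = res ++ ws.take ((pvPrefix ws t).countP (fun p => decide (p ≤ M))) := by
  induction ws generalizing t res with
  | nil => simp [pvALoop, pvPrefix]
  | cons w ws ih =>
    simp only [pvALoop, pvPrefix, List.countP_cons, PySem.Str.len_eq, String.length_toList]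
    by_cases h : M < t + (w.length : Int) + 1
    · rw [if_pos h, pv_countP_zero M ws (t + (w.length : Int) + 1) (by omega)]
      have hd : ¬ (t + (w.length : Int) + 1 ≤ M) := by omega
      simp [hd]
    · rw [if_neg h, ih]
      have hc : t + (w.length : Int) + 1 ≤ M := by omega
      simp [hc]

theorem make_default_short_help_eq (help : String) (max_length : Int) :
    make_default_short_help help max_length = make_default_short_help_alt help max_length := by
  unfold make_default_short_help make_default_short_help_alt
  dsimp only
  rw [pv_aloop_eq_take, pv_foldl_count, zero_add,
      PySem.List.slice_to _ (Int.natCast_nonneg _)]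
  simp

-- ===== VERDICT =====
theorem make_default_short_help_spec : Claim_equal_make_default_short_help := by
  intro help max_length _
  exact make_default_short_help_eq help max_length
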